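-- pv_equiv track=rewrite | github.com/yannickloth/W33-Theory | THE_FINAL_FOUR.py | symplectic_sign
-- ===== SOURCE A (Python) =====
-- def support(c):
--     return frozenset(i for i, x in enumerate(c) if x != 0)
--
-- def symplectic_sign(c1, c2):
--     """Sign from Heisenberg symplectic structure."""
--     # Map positions to F₃² points (using first 9 positions → F₃²)
--     # This is a heuristic - need to find exact map
--     H1, H2 = support(c1), support(c2)
--
--     # Sum symplectic contributions from positions
--     total = 0
--     for i in H1:
--         for j in H2:
--             # Position → point in F₃²
--             # Simple map: i → (i % 3, i // 3) for i < 9, special for i >= 9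
--             if i < 9:
--                 pi = (i % 3, i // 3)
--             else:
--                 pi = ((i - 9) % 2, (i - 9) // 2)  # Remaining 3 positions
--             if j < 9:
--                 pj = (j % 3, j // 3)
--             else:
--                 pj = ((j - 9) % 2, (j - 9) // 2)
--
--             total = (total + pi[0] * pj[1] - pj[0] * pi[1]) % 3
--
--     return 1 if total == 0 else (-1 if total == 1 else 1)
-- ===== SOURCE B (Python) =====
-- def symplectic_sign(c1, c2):
--     """Sign from Heisenberg symplectic structure."""
--     def coord_sums(c):
--         x = y = 0
--         for i, v in enumerate(c):
--             if v != 0: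
--                 if i < 9:
--                     x += i % 3
--                     y += i // 3
--                 else:
--                     x += (i - 9) % 2
--                     y += (i - 9) // 2
--         return x, y
--     x1, y1 = coord_sums(c1)
--     x2, y2 = coord_sums(c2)
--     return -1 if (x1 * y2 - x2 * y1) % 3 == 1 else 1
-- ===== Notes on version B (the rewrite author's own statement) =====
-- stated objective: faster
-- what changed: The double loop over all support pairs is replaced by the bilinear factorisation: one pass per vector computes the coordinate sums of its support, and the sign is read off (sx1*sy2 - sx2*sy1) % 3.
import Mathlib
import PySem

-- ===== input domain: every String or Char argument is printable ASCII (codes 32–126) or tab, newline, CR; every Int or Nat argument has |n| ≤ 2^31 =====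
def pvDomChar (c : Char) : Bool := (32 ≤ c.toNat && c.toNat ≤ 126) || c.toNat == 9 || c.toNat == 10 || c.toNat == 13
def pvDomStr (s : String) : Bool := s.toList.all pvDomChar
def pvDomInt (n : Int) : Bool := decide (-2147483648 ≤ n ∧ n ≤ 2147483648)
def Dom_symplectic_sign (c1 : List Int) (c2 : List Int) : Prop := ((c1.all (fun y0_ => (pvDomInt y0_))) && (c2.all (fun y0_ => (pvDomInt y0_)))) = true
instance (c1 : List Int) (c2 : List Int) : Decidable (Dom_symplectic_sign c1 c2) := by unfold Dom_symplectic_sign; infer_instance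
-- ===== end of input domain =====

-- B replaces A's double loop over support pairs by the bilinear factorisation
-- (one pass per vector computing coordinate sums); objective: faster (asymptotic).

-- ===== PORT A =====
-- support(c): indices of nonzero entries (frozenset; indices are distinct, kept in index order)
def supportA (c : List Int) : List Int :=
  (PySem.List.enumerate c).filterMap (fun p => if p.2 ≠ 0 then some p.1 else none)

-- the position → F₃² point map A computes inline for both i and j
def pmapA (i : Int) : Int × Int :=
  if i < 9 then (PySem.Int.mod i 3, PySem.Int.floordiv i 3)
  else (PySem.Int.mod (i - 9) 2, PySem.Int.floordiv (i - 9) 2)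

def symplectic_sign (c1 : List Int) (c2 : List Int) : Int :=
  let H1 := supportA c1
  let H2 := supportA c2
  let total := H1.foldl (fun t i =>
    H2.foldl (fun t j =>
      let pi := pmapA i
      let pj := pmapA j
      PySem.Int.mod (t + pi.1 * pj.2 - pj.1 * pi.2) 3) t) 0
  if total = 0 then 1 else if total = 1 then -1 else 1

-- ===== PORT B =====
-- one pass: sums of the two F₃² coordinates over the support
def coordSums (c : List Int) : Int × Int :=
  (PySem.List.enumerate c).foldl (fun s p =>
    if p.2 ≠ 0 then
      if p.1 < 9 then
        (s.1 + PySem.Int.mod p.1 3, s.2 + PySem.Int.floordiv p.1 3)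
      else
        (s.1 + PySem.Int.mod (p.1 - 9) 2, s.2 + PySem.Int.floordiv (p.1 - 9) 2)
    else s) (0, 0)

def symplectic_sign_alt (c1 : List Int) (c2 : List Int) : Int :=
  let s1 := coordSums c1
  let s2 := coordSums c2
  if PySem.Int.mod (s1.1 * s2.2 - s2.1 * s1.2) 3 = 1 then -1 else 1

-- ===== PRECONDITION & SPEC =====
def Spec_symplectic_sign (c1 : List Int) (c2 : List Int) (out : Int) : Prop := out = symplectic_sign_alt c1 c2
instance (c1 : List Int) (c2 : List Int) (out : Int) : Decidable (Spec_symplectic_sign c1 c2 out) := by unfold Spec_symplectic_sign; infer_instance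

-- ===== CLAIM (what is proved, stated in full; the proofs are below) =====
def Claim_equal_symplectic_sign : Prop := ∀ (c1 : List Int) (c2 : List Int), Dom_symplectic_sign c1 c2 → Spec_symplectic_sign c1 c2 (symplectic_sign c1 c2)

-- ===== LEMMAS AND PROOFS =====

-- sum of first/second coordinates over a list of positions
def sx (l : List Int) : Int := (l.map (fun i => (pmapA i).1)).sum
def sy (l : List Int) : Int := (l.map (fun i => (pmapA i).2)).sum

-- B's one-pass coordinate sums are exactly (sx, sy) over A's support list
theorem coordSums_fold (l : List (Int × Int)) (s : Int × Int) :
    l.foldl (fun s p =>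
      if p.2 ≠ 0 then
        if p.1 < 9 then
          (s.1 + PySem.Int.mod p.1 3, s.2 + PySem.Int.floordiv p.1 3)
        else
          (s.1 + PySem.Int.mod (p.1 - 9) 2, s.2 + PySem.Int.floordiv (p.1 - 9) 2)
      else s) s
    = (s.1 + sx (l.filterMap (fun p => if p.2 ≠ 0 then some p.1 else none)),
       s.2 + sy (l.filterMap (fun p => if p.2 ≠ 0 then some p.1 else none))) := by
  induction l generalizing s with
  | nil => simp [sx, sy]
  | cons p xs ih =>
    by_cases hz : p.2 = 0
    · simpa [hz] using ih s
    · rw [List.foldl_cons, List.filterMap_cons]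
      by_cases h9 : p.1 < 9 <;>
        · simp only [hz, h9, if_true, if_false, ne_eq, not_false_eq_true]
          rw [ih]
          simp [sx, sy, pmapA, h9]
          exact ⟨by ring, by ring⟩

theorem foldl_congr' {α : Type} (f g : Int → α → Int) (l : List α) (b : Int)
    (h : ∀ (t : Int) (x : α), f t x = g t x) : l.foldl f b = l.foldl g b := by
  induction l generalizing b with
  | nil => rfl
  | cons x xs ih => rw [List.foldl_cons, List.foldl_cons, h, ih]

theorem coordSums_eq (c : List Int) : coordSums c = (sx (supportA c), sy (supportA c)) := by
  unfold coordSums supportA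
  rw [coordSums_fold]
  simp

-- generic mod-3 accumulating fold: residue of the result
theorem fold_mod3_mod (a : Int → Int) (l : List Int) (t : Int) :
    (l.foldl (fun t j => (t + a j) % 3) t) % 3 = (t + (l.map a).sum) % 3 := by
  induction l generalizing t with
  | nil => simp
  | cons x xs ih =>
    rw [List.foldl_cons, ih, List.map_cons, List.sum_cons]
    omega

-- and the result is reduced when the list is nonempty
theorem fold_mod3_bounds (a : Int → Int) (l : List Int) (t : Int) (h : l ≠ []) :
    0 ≤ l.foldl (fun t j => (t + a j) % 3) t ∧
      l.foldl (fun t j => (t + a j) % 3) t < 3 := by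
  induction l generalizing t with
  | nil => exact absurd rfl h
  | cons x xs ih =>
    cases xs with
    | nil =>
      simp only [List.foldl_cons, List.foldl_nil]
      omega
    | cons y ys => exact ih _ (by simp)

theorem fold_mod3 (a : Int → Int) (l : List Int) (t : Int) (h : l ≠ []) :
    l.foldl (fun t j => (t + a j) % 3) t = (t + (l.map a).sum) % 3 := by
  have h1 := fold_mod3_mod a l t
  have h2 := fold_mod3_bounds a l t h
  omega

-- row sum: bilinearity in the second argument
theorem rowsum (l : List Int) (u v : Int) :
    (l.map (fun j => u * (pmapA j).2 - (pmapA j).1 * v)).sum = u * sy l - sx l * v := by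
  induction l with
  | nil => simp [sx, sy]
  | cons x xs ih =>
    rw [List.map_cons, List.sum_cons, ih]
    simp [sx, sy]
    ring

-- column sum: bilinearity in the first argument
theorem colsum (l : List Int) (p q : Int) :
    (l.map (fun i => (pmapA i).1 * q - p * (pmapA i).2)).sum = sx l * q - p * sy l := by
  induction l with
  | nil => simp [sx, sy]
  | cons x xs ih =>
    rw [List.map_cons, List.sum_cons, ih]
    simp [sx, sy]
    ring

theorem foldl_id {α : Type} (l : List α) (b : Int) : l.foldl (fun t _ => t) b = b := by
  induction l generalizing b with
  | nil => rfl
  | cons x xs ih => exact ih b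

-- A's nested fold equals the factorised residue
theorem total_eq (X1 X2 : List Int) :
    X1.foldl (fun t i =>
      X2.foldl (fun t j =>
        let pi := pmapA i
        let pj := pmapA j
        PySem.Int.mod (t + pi.1 * pj.2 - pj.1 * pi.2) 3) t) 0
    = PySem.Int.mod (sx X1 * sy X2 - sx X2 * sy X1) 3 := by
  rw [PySem.Int.mod_eq_emod_of_pos (by norm_num : (0:Int) < 3)]
  by_cases h2 : X2 = []
  · subst h2
    simp only [List.foldl_nil, foldl_id]
    simp [sx, sy]
  · have hrow : ∀ (i : Int) (t : Int),
        X2.foldl (fun t j =>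
          let pi := pmapA i
          let pj := pmapA j
          PySem.Int.mod (t + pi.1 * pj.2 - pj.1 * pi.2) 3) t
        = (t + ((pmapA i).1 * sy X2 - sx X2 * (pmapA i).2)) % 3 := by
      intro i t
      have heq : (fun (t : Int) (j : Int) =>
          let pi := pmapA i
          let pj := pmapA j
          PySem.Int.mod (t + pi.1 * pj.2 - pj.1 * pi.2) 3)
        = (fun (t : Int) (j : Int) =>
            (t + ((pmapA i).1 * (pmapA j).2 - (pmapA j).1 * (pmapA i).2)) % 3) := by
        funext t j
        rw [PySem.Int.mod_eq_emod_of_pos (by norm_num : (0:Int) < 3)]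
        ring_nf
      rw [heq, fold_mod3 _ X2 t h2, rowsum]
    by_cases h1 : X1 = []
    · subst h1
      simp [sx, sy]
    · calc X1.foldl (fun t i =>
          X2.foldl (fun t j =>
            let pi := pmapA i
            let pj := pmapA j
            PySem.Int.mod (t + pi.1 * pj.2 - pj.1 * pi.2) 3) t) 0
          = X1.foldl (fun t i =>
              (t + ((pmapA i).1 * sy X2 - sx X2 * (pmapA i).2)) % 3) 0 := by
            refine foldl_congr' _ _ X1 0 ?_
            intro t i
            exact hrow i t
        _ = (0 + (X1.map (fun i => (pmapA i).1 * sy X2 - sx X2 * (pmapA i).2)).sum) % 3 :=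
            fold_mod3 _ X1 0 h1
        _ = (sx X1 * sy X2 - sx X2 * sy X1) % 3 := by
            rw [colsum]
            ring_nf

-- ===== VERDICT (by name: the statement is the Claim_ definition above) =====
theorem symplectic_sign_spec : Claim_equal_symplectic_sign := by
  intro c1 c2 _
  unfold Spec_symplectic_sign symplectic_sign symplectic_sign_alt
  simp only [coordSums_eq, total_eq]
  split_ifs <;> omega
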